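-- pv_equiv track=rewrite | github.com/peytontolbert/model-stack | tensor/numerics.py | bucket_sizes
-- ===== SOURCE A (Python) =====
-- def bucket_sizes(N: int, max_bytes: int, item_bytes: int = 1) -> list[int]:
--     per = max(1, int(max_bytes // max(1, int(item_bytes))))
--     out = []
--     s = 0
--     while s < N:
--         e = min(N, s + per)
--         out.append(e - s)
--         s = e
--     return out
-- ===== SOURCE B (Python) =====
-- def bucket_sizes(N: int, max_bytes: int, item_bytes: int = 1) -> list[int]:
--     per = max(1, int(max_bytes // max(1, int(item_bytes))))
--     if N <= 0:
--         return []
--     full, rem = divmod(N, per)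
--     return [per] * full + ([rem] if rem else [])
-- ===== Notes on version B (the rewrite author's own statement) =====
-- stated objective: idiomatic
-- what changed: Replaces the cursor while-loop with a closed-form divmod count-and-build: [per]*full plus an optional remainder bucket, guarded by N <= 0.
import Mathlib
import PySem

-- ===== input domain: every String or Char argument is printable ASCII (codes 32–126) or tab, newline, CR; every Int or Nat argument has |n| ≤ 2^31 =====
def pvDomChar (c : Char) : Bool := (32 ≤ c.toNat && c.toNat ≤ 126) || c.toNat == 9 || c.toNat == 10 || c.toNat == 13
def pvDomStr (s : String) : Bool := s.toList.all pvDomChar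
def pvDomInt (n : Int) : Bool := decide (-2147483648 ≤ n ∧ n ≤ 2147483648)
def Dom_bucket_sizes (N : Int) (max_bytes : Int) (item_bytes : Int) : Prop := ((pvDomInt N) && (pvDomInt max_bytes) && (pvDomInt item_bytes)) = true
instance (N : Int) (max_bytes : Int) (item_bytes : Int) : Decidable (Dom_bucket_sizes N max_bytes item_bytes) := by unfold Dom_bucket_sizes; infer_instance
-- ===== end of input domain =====

-- B replaces A's cursor while-loop by a closed-form divmod count-and-build (same values, same cost class).

-- ===== PORT A =====
-- A's while loop: s advances by min(N, s+per) - s each step; per ≥ 1 is carried as a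
-- hypothesis (A always calls it with per = max 1 …) so the recursion terminates.
def bucketLoopA (N per : Int) (hper : 1 ≤ per) (s : Int) : List Int :=
  if _h : s < N then
    (min N (s + per) - s) :: bucketLoopA N per hper (min N (s + per))
  else []
termination_by (N - s).toNat
decreasing_by omega

def bucket_sizes (N : Int) (max_bytes : Int) (item_bytes : Int) : List Int :=
  bucketLoopA N (max 1 (PySem.Int.floordiv max_bytes (max 1 item_bytes))) (le_max_left _ _) 0

-- ===== PORT B =====
def bucket_sizes_alt (N : Int) (max_bytes : Int) (item_bytes : Int) : List Int :=
  let per := max 1 (PySem.Int.floordiv max_bytes (max 1 item_bytes))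
  if N ≤ 0 then []
  else
    let full := PySem.Int.floordiv N per
    let rem := PySem.Int.mod N per
    List.replicate full.toNat per ++ (if rem ≠ 0 then [rem] else [])

-- ===== PRECONDITION & SPEC =====
def Spec_bucket_sizes (N : Int) (max_bytes : Int) (item_bytes : Int) (out : List Int) : Prop := out = bucket_sizes_alt N max_bytes item_bytes
instance (N : Int) (max_bytes : Int) (item_bytes : Int) (out : List Int) : Decidable (Spec_bucket_sizes N max_bytes item_bytes out) := by unfold Spec_bucket_sizes; infer_instance

-- ===== CLAIM (what is proved, stated in full; the proofs are below) =====
def Claim_equal_bucket_sizes : Prop := ∀ (N : Int) (max_bytes : Int) (item_bytes : Int), Dom_bucket_sizes N max_bytes item_bytes → Spec_bucket_sizes N max_bytes item_bytes (bucket_sizes N max_bytes item_bytes)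

-- ===== LEMMAS AND PROOFS =====

-- A's loop from cursor s computes the closed form on the remaining length M = N - s.
theorem bucketLoopA_closed (per : Int) (hper : 1 ≤ per) :
    ∀ (k : Nat) (N s : Int), (N - s).toNat ≤ k → s < N →
      bucketLoopA N per hper s =
        List.replicate ((N - s) / per).toNat per ++
          (if (N - s) % per ≠ 0 then [(N - s) % per] else []) := by
  intro k
  induction k with
  | zero => intro N s hk hs; omega
  | succ k ih =>
    intro N s hk hs
    rw [bucketLoopA, dif_pos hs]
    by_cases hbig : s + per < N
    · have hmin : min N (s + per) = s + per := by omega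
      rw [hmin, ih N (s + per) (by omega) (by omega)]
      have hdiv : (N - (s + per)) / per = (N - s) / per - 1 := by
        have := Int.add_mul_ediv_right (N - s) (-1) (show per ≠ 0 by omega)
        have he : N - (s + per) = N - s + (-1) * per := by ring
        rw [he, this]; ring
      have hmod : (N - (s + per)) % per = (N - s) % per := by
        have he : N - (s + per) = N - s + (-1) * per := by ring
        rw [he, Int.add_mul_emod_self_right]
      have hpos : 1 ≤ (N - s) / per := by
        have : per ≤ N - s := by omega
        calc (1 : Int) = per / per := (Int.ediv_self (by omega)).symm
        _ ≤ (N - s) / per := Int.ediv_le_ediv (by omega) this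
      have hrep : ((N - s) / per).toNat = ((N - (s + per)) / per).toNat + 1 := by
        rw [hdiv]; omega
      rw [hrep, List.replicate_succ, hmod]
      simp
    · -- last bucket: remaining M = N - s with 0 < M ≤ per
      have hmin : min N (s + per) = N := by omega
      rw [hmin, bucketLoopA, dif_neg (by omega)]
      by_cases heq : N - s = per
      · have hd : (N - s) / per = 1 := by rw [heq]; exact Int.ediv_self (by omega)
        have hm : (N - s) % per = 0 := by rw [heq]; exact Int.emod_self
        rw [hd, hm]
        simp [heq]
      · have hlt : N - s < per := by omega
        have hd : (N - s) / per = 0 := Int.ediv_eq_zero_of_lt (by omega) hlt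
        have hm : (N - s) % per = N - s := Int.emod_eq_of_lt (by omega) hlt
        rw [hd, hm]
        simp [show N - s ≠ 0 by omega]

-- top-level form: A's loop from 0 equals B's closed form
theorem loop_eq_closed (N per : Int) (hper : 1 ≤ per) :
    bucketLoopA N per hper 0 =
      if N ≤ 0 then []
      else List.replicate (PySem.Int.floordiv N per).toNat per ++
        (if PySem.Int.mod N per ≠ 0 then [PySem.Int.mod N per] else []) := by
  by_cases hN : N ≤ 0
  · rw [bucketLoopA, dif_neg (by omega), if_pos hN]
  · rw [if_neg hN,
      PySem.Int.floordiv_eq_ediv_of_pos (by omega : (0:Int) < per),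
      PySem.Int.mod_eq_emod_of_pos (by omega : (0:Int) < per)]
    have := bucketLoopA_closed per hper (N - 0).toNat N 0 le_rfl (by omega)
    rw [this]
    norm_num

-- ===== VERDICT (by name: the statement is the Claim_ definition above) =====
theorem bucket_sizes_spec : Claim_equal_bucket_sizes := by
  intro N max_bytes item_bytes _
  unfold Spec_bucket_sizes bucket_sizes bucket_sizes_alt
  exact loop_eq_closed N _ (le_max_left _ _)
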